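-- pv_equiv track=rewrite | github.com/RicBent/rubysubs | rubysubs/rubysubs.py | strip_ass_tags
-- ===== SOURCE A (Python) =====
-- def strip_ass_tags(text):
--     ret = ''
--     in_curly = False
--     for c in text:
--         if c == '{':
--             in_curly = True
--         elif c == '}':
--             in_curly = False
--         elif not in_curly:
--             ret += c
--     return ret
-- ===== SOURCE B (Python) =====
-- def strip_ass_tags(text):
--     out = []
--     for seg in text.split('}'):
--         i = seg.find('{')
--         out.append(seg if i < 0 else seg[:i])
--     return ''.join(out)
-- ===== Notes on version B (the rewrite author's own statement) =====
-- stated objective: idiomatic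
-- what changed: Replaces the char-by-char in_curly state machine with split-on-'}' segments, each cut before its first '{', then joined.
import Mathlib
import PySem

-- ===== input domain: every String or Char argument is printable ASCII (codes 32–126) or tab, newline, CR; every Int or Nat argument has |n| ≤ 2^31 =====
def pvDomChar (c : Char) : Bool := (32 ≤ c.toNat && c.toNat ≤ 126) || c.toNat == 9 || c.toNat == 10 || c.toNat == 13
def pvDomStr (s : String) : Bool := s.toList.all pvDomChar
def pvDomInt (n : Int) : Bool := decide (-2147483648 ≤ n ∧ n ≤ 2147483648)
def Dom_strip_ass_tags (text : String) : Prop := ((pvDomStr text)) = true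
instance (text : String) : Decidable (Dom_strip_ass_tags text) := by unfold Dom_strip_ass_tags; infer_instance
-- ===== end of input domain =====

-- B replaces A's char-by-char state machine with split-on-'}' / cut-at-'{' segment processing (idiomatic; same cost).

-- ===== PORT A =====
-- literal port of the for-loop with accumulators ret (string) and in_curly (bool)
def strip_ass_tags (text : String) : String :=
  let r := text.toList.foldl (fun (st : List Char × Bool) c =>
      if c = '{' then (st.1, true)
      else if c = '}' then (st.1, false)
      else if st.2 = false then (st.1 ++ [c], st.2)
      else st) ([], false)
  String.mk r.1

-- ===== PORT B =====
-- seg.find('{'); seg if i < 0 else seg[:i]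
def pvBSeg (seg : List Char) : List Char :=
  let i := PySem.Chars.find seg ['{']
  if i < 0 then seg else PySem.Chars.slice seg none (some i)

-- ''.join(pvBSeg(seg) for seg in text.split('}'))
def strip_ass_tags_alt (text : String) : String :=
  String.mk (PySem.Chars.join []
    ((PySem.Chars.splitOn text.toList ['}']).map pvBSeg))

-- ===== PRECONDITION & SPEC =====
def Spec_strip_ass_tags (text : String) (out : String) : Prop := out = strip_ass_tags_alt text
instance (text : String) (out : String) : Decidable (Spec_strip_ass_tags text out) := by unfold Spec_strip_ass_tags; infer_instance

-- ===== CLAIM (what is proved, stated in full; the proofs are below) =====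
def Claim_equal_strip_ass_tags : Prop := ∀ (text : String), Dom_strip_ass_tags text → Spec_strip_ass_tags text (strip_ass_tags text)

-- ===== LEMMAS AND PROOFS =====

-- structural model of split on a single-character separator
def pvSp (s : Char) : List Char → List (List Char)
  | [] => [[]]
  | c :: t => if c = s then [] :: pvSp s t else (pvSp s t).modifyHead (c :: ·)

lemma pvSp_ne_nil (s : Char) (l : List Char) : pvSp s l ≠ [] := by
  induction l with
  | nil => simp [pvSp]
  | cons c t ih =>
    simp only [pvSp]
    split_ifs
    · simp
    · cases h : pvSp s t with
      | nil => exact absurd h ih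
      | cons a b => simp

lemma pvSplitOn_go_eq (s : Char) :
    ∀ fuel (l cur : List Char) (ls : List (List Char)), l.length < fuel →
      PySem.Chars.splitOn.go [s] fuel l cur ls =
        ls.reverse ++ (cur.reverse ++ (pvSp s l).headD []) :: (pvSp s l).tail := by
  intro fuel
  induction fuel with
  | zero => intro l cur ls h; omega
  | succ fuel ih =>
    intro l cur ls h
    cases l with
    | nil => simp [PySem.Chars.splitOn.go, pvSp]
    | cons c rest =>
      obtain ⟨h0, t0, hht⟩ : ∃ h0 t0, pvSp s rest = h0 :: t0 := by
        cases hx : pvSp s rest with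
        | nil => exact absurd hx (pvSp_ne_nil s rest)
        | cons a b => exact ⟨a, b, rfl⟩
      by_cases hc : c = s
      · have hp : List.isPrefixOf [s] (c :: rest) = true := by
          simp [List.isPrefixOf, hc]
        rw [PySem.Chars.splitOn.go, if_pos hp]
        rw [ih _ _ _ (by simpa using Nat.lt_of_succ_lt_succ h)]
        simp [pvSp, hc, hht]
      · have hp : List.isPrefixOf [s] (c :: rest) = false := by
          simp [List.isPrefixOf]
          exact fun hEq => absurd hEq.symm hc
        rw [PySem.Chars.splitOn.go, if_neg (by simp [hp])]
        rw [ih _ _ _ (by simpa using Nat.lt_of_succ_lt_succ h)]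
        simp [pvSp, hc, hht]

lemma pvSplitOn_eq (s : Char) (l : List Char) :
    PySem.Chars.splitOn l [s] = pvSp s l := by
  rw [PySem.Chars.splitOn, pvSplitOn_go_eq s _ _ _ _ (by omega)]
  cases hx : pvSp s l with
  | nil => exact absurd hx (pvSp_ne_nil s l)
  | cons a b => simp

-- structural model of A's loop
def pvRun : List Char → Bool → List Char
  | [], _ => []
  | c :: t, b =>
    if c = '{' then pvRun t true
    else if c = '}' then pvRun t false
    else if b = false then c :: pvRun t b
    else pvRun t b

lemma pvFoldlA (l : List Char) : ∀ (acc : List Char) (b : Bool),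
    (l.foldl (fun (st : List Char × Bool) c =>
      if c = '{' then (st.1, true)
      else if c = '}' then (st.1, false)
      else if st.2 = false then (st.1 ++ [c], st.2)
      else st) (acc, b)).1 = acc ++ pvRun l b := by
  induction l with
  | nil => simp [pvRun]
  | cons c t ih =>
    intro acc b
    simp only [List.foldl_cons, pvRun]
    split_ifs <;> simp [*]

lemma take_eq_takeWhile (p : Char → Bool) : ∀ (l : List Char) (k : Nat),
    (∀ j (h : j < k) (h2 : j < l.length), p l[j] = true) →
    (∀ h : k < l.length, p l[k] = false) →
    l.take k = l.takeWhile p := by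
  intro l
  induction l with
  | nil => simp
  | cons c t ih =>
    intro k hall hk
    cases k with
    | zero =>
      have := hk (by simp)
      simp_all
    | succ k =>
      have hc : p c = true := hall 0 (by omega) (by simp)
      simp [hc, ih k (fun j hj h2 => hall (j + 1) (by omega) (by simpa using h2))
        (fun h => hk (by simpa using h))]

lemma pvBSeg_eq_takeWhile (seg : List Char) :
    pvBSeg seg = seg.takeWhile (fun c => !(c == '{')) := by
  unfold pvBSeg
  simp only []
  by_cases h : PySem.Chars.find seg ['{'] < 0
  · have h1 : PySem.Chars.find seg ['{'] = -1 := by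
      have := PySem.Chars.neg_one_le_find seg ['{']
      omega
    rw [if_pos h]
    have hmem : '{' ∉ seg := by
      have := (PySem.Chars.find_eq_neg_one_iff seg ['{']).mp h1
      simpa [List.singleton_infix_iff] using this
    rw [List.takeWhile_eq_self_iff.mpr]
    intro x hx
    simp only [Bool.not_eq_true']
    exact decide_eq_false (by rintro rfl; exact hmem hx)
  · rw [if_neg h]
    have h0 : 0 ≤ PySem.Chars.find seg ['{'] := by omega
    obtain ⟨hpre, hmin⟩ := PySem.Chars.find_spec (s := seg) (sub := ['{']) h0
    set i := (PySem.Chars.find seg ['{']).toNat with hi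
    have hslice : PySem.Chars.slice seg none (some (PySem.Chars.find seg ['{'])) = seg.take i := by
      rw [PySem.Chars.slice_eq_listSlice]
      exact PySem.List.slice_to seg h0
    rw [hslice]
    apply take_eq_takeWhile
    · intro j hj h2
      simp only [Bool.not_eq_true']
      apply decide_eq_false
      intro hEq
      apply hmin j hj
      refine ⟨(seg.drop j).tail, ?_⟩
      have : seg.drop j = seg[j] :: (seg.drop j).tail := by
        rw [List.drop_eq_getElem_cons h2]; rfl
      simpa [hEq] using this.symm
    · intro hlt
      obtain ⟨t, ht⟩ := hpre
      have hdrop : seg.drop i = '{' :: t := ht.symm ▸ rfl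
      have : seg[i] = '{' := by
        have h2 := List.drop_eq_getElem_cons hlt
        rw [hdrop] at h2
        exact (List.cons.injEq _ _ _ _ ▸ h2).1.symm
      simp [this]

lemma pvJoin_nil_flatten (parts : List (List Char)) :
    PySem.Chars.join [] parts = parts.flatten := by
  induction parts with
  | nil => simp [PySem.Chars.join_nil]
  | cons a t ih =>
    cases t with
    | nil => simp [PySem.Chars.join_singleton]
    | cons b u => simp [PySem.Chars.join_cons_cons, ih]

lemma pvMain (l : List Char) :
    pvRun l false = ((pvSp '}' l).map (fun seg => seg.takeWhile (fun c => !(c == '{')))).flatten ∧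
    pvRun l true = (((pvSp '}' l).tail).map (fun seg => seg.takeWhile (fun c => !(c == '{')))).flatten := by
  induction l with
  | nil => simp [pvRun, pvSp]
  | cons c t ih =>
    obtain ⟨h0, t0, hht⟩ : ∃ h0 t0, pvSp '}' t = h0 :: t0 := by
      cases hx : pvSp '}' t with
      | nil => exact absurd hx (pvSp_ne_nil '}' t)
      | cons a b => exact ⟨a, b, rfl⟩
    by_cases hc : c = '}'
    · constructor <;> simp [pvRun, pvSp, hc, ih.1]
    · by_cases hb : c = '{'
      · constructor <;> simp [pvRun, pvSp, hb, hht, ih.2]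
      · have hstep : (c :: h0).takeWhile (fun c => !(c == '{')) =
            c :: h0.takeWhile (fun c => !(c == '{')) := by
          simp [hb]
        constructor
        · simp [pvRun, pvSp, hb, hc, hht, hstep, ih.1]
        · simp [pvRun, pvSp, hb, hc, hht, ih.2]

-- ===== VERDICT (by name: the statement is the Claim_ definition above) =====
theorem strip_ass_tags_spec : Claim_equal_strip_ass_tags := by
  intro text _
  unfold Spec_strip_ass_tags strip_ass_tags strip_ass_tags_alt
  rw [pvJoin_nil_flatten, pvSplitOn_eq]
  show String.mk (text.toList.foldl _ ([], false)).1 = _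
  rw [pvFoldlA]
  have hmap : (pvSp '}' text.toList).map pvBSeg =
      (pvSp '}' text.toList).map (fun seg => seg.takeWhile (fun c => !(c == '{'))) := by
    exact List.map_congr_left (fun seg _ => pvBSeg_eq_takeWhile seg)
  rw [hmap, ← (pvMain text.toList).1]
  simp
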